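-- pv_equiv track=rewrite | github.com/mirauta-alexandru/Wispy-ai | finetune/generate_dataset_v3.py | get_prefix_positions
-- ===== SOURCE A (Python) =====
-- def get_prefix_positions(cmd: str) -> list[int]:
--     positions = set()
--     words = cmd.split()
--
--     # Primele 2-5 caractere
--     for i in range(2, min(6, len(cmd))):
--         positions.add(i)
--
--     # Word boundaries
--     pos = 0
--     for word in words[:-1]:
--         pos += len(word) + 1
--         if 2 <= pos < len(cmd):
--             positions.add(pos)
--
--     # Primele 1-3 litere din fiecare cuvant
--     pos = 0
--     for word in words:
--         for offset in range(1, 4):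
--             p = pos + offset
--             if 2 <= p < len(cmd):
--                 positions.add(p)
--         pos += len(word) + 1
--
--     return sorted(p for p in positions if 2 <= p < len(cmd))
-- ===== SOURCE B (Python) =====
-- def get_prefix_positions(cmd: str) -> list[int]:
--     # Position-centric formulation: instead of generating candidate cuts from three
--     # marking loops (fixed prefix 2..5, word boundaries, +1..+3 offsets) and sorting,
--     # test each position p directly against one unified predicate: p is a cut iff
--     # 2 <= p < len(cmd) and (p < 6 or p lies at distance 0..3 after some word start).
--     # This is correct because a boundary IS the next word's start (distance 0) and the
--     # offsets are distances 1..3; distance 0 from the first start (p == 0) is below 2,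
--     # and distances 1..3 from it give p <= 3 < 6, so the p < 6 clause absorbs them.
--     starts = []
--     total = 0
--     for w in cmd.split():
--         starts.append(total)
--         total += len(w) + 1
--     return [p for p in range(2, len(cmd))
--             if p < 6 or any(s <= p <= s + 3 for s in starts)]
-- ===== Notes on version B (the rewrite author's own statement) =====
-- stated objective: alternative
-- what changed: Replaces A's three candidate-generating loops (prefix 2..5, word boundaries, +1..+3 offsets) plus set-dedup and sort with a position-centric scan: each p in range(2,len(cmd)) is tested against one unified predicate 'p < 6 or p lies at distance 0..3 after some word start', which subsumes boundaries (distance 0) and offsets (1..3), emitting the result already sorted and distinct.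
import Mathlib
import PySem

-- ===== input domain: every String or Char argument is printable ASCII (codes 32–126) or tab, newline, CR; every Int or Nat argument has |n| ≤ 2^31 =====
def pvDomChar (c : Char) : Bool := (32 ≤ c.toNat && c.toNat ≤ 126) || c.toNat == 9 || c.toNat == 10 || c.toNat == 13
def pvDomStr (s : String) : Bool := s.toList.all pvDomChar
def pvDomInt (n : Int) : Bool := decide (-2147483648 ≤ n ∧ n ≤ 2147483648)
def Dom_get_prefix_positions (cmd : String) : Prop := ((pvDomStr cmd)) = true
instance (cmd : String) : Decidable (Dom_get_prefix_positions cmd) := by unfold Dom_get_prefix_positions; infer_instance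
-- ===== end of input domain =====

-- B replaces A's three candidate-generating loops plus set-dedup and sort by a
-- position-centric scan testing each p against one unified distance predicate
-- (objective: alternative).

-- ===== PORT A =====
-- loop body of A's second loop ('for word in words[:-1]: pos += len(word)+1; if 2<=pos<len(cmd): positions.add(pos)')
def gppStepA2 (n : Int) (st : Int × PySem.Set Int) (w : String) : Int × PySem.Set Int :=
  let pos := st.1 + (PySem.Str.len w : Int) + 1
  (pos, if 2 ≤ pos ∧ pos < n then PySem.Set.add st.2 pos else st.2)

-- loop body of A's third loop ('for word in words: for offset in range(1,4): …; pos += len(word)+1')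
def gppStepA3 (n : Int) (st : Int × PySem.Set Int) (w : String) : Int × PySem.Set Int :=
  let s := (PySem.List.pyRange 1 4 1).foldl
    (fun s off => let p := st.1 + off; if 2 ≤ p ∧ p < n then PySem.Set.add s p else s) st.2
  (st.1 + (PySem.Str.len w : Int) + 1, s)

def get_prefix_positions (cmd : String) : List Int :=
  let n : Int := (PySem.Str.len cmd : Int)
  let words := PySem.Str.split₀ cmd
  -- positions = set(); for i in range(2, min(6, len(cmd))): positions.add(i)
  let positions : PySem.Set Int :=
    (PySem.List.pyRange 2 (min 6 n) 1).foldl (fun s i => PySem.Set.add s i) PySem.Set.empty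
  -- pos = 0; for word in words[:-1]: …
  let st1 := (PySem.List.slice words none (some (-1))).foldl (gppStepA2 n) (0, positions)
  -- pos = 0; for word in words: …
  let st2 := words.foldl (gppStepA3 n) (0, st1.2)
  -- sorted(p for p in positions if 2 <= p < len(cmd))
  PySem.List.sorted (st2.2.filter (fun p => decide (2 ≤ p) && decide (p < n))) (fun x => x) false

-- ===== PORT B =====
def get_prefix_positions_alt (cmd : String) : List Int :=
  -- starts = []; total = 0; for w in cmd.split(): starts.append(total); total += len(w)+1
  let st := (PySem.Str.split₀ cmd).foldl
    (fun (st : List Int × Int) w => (st.1 ++ [st.2], st.2 + (PySem.Str.len w : Int) + 1)) ([], 0)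
  -- [p for p in range(2, len(cmd)) if p < 6 or any(s <= p <= s+3 for s in starts)]
  (PySem.List.pyRange 2 (PySem.Str.len cmd : Int) 1).filter
    (fun p => decide (p < 6) || st.1.any (fun s => decide (s ≤ p) && decide (p ≤ s + 3)))

-- ===== PRECONDITION & SPEC =====
def Spec_get_prefix_positions (cmd : String) (out : List Int) : Prop := out = get_prefix_positions_alt cmd
instance (cmd : String) (out : List Int) : Decidable (Spec_get_prefix_positions cmd out) := by unfold Spec_get_prefix_positions; infer_instance

-- ===== CLAIM (what is proved, stated in full; the proofs are below) =====
def Claim_equal_get_prefix_positions : Prop := ∀ (cmd : String), Dom_get_prefix_positions cmd → Spec_get_prefix_positions cmd (get_prefix_positions cmd)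

-- ===== LEMMAS AND PROOFS =====

-- word-start positions (the value of 'pos'/'total' when each word is processed)
def gppStarts : List String → Int → List Int
  | [], _ => []
  | w :: t, pos => pos :: gppStarts t (pos + (PySem.Str.len w : Int) + 1)

-- the boundary values A's second loop tests (the value of 'pos' after each word)
def gppBnds : List String → Int → List Int
  | [], _ => []
  | w :: t, pos => (pos + (PySem.Str.len w : Int) + 1) :: gppBnds t (pos + (PySem.Str.len w : Int) + 1)

-- the membership predicate A's set realises
def gppP (n : Int) (ws : List String) (x : Int) : Prop :=
  (2 ≤ x ∧ x < min 6 n) ∨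
  (x ∈ (gppStarts ws 0).tail ∧ 2 ≤ x ∧ x < n) ∨
  (∃ s ∈ gppStarts ws 0, ∃ off : Int, 1 ≤ off ∧ off ≤ 3 ∧ x = s + off ∧ 2 ≤ x ∧ x < n)

lemma gppP_bounds {n : Int} {ws : List String} {x : Int} (h : gppP n ws x) : 2 ≤ x ∧ x < n := by
  rcases h with ⟨h2, hm⟩ | ⟨_, h2, hn⟩ | ⟨_, _, _, _, _, _, h2, hn⟩
  · exact ⟨h2, lt_of_lt_of_le hm (min_le_right _ _)⟩
  · exact ⟨h2, hn⟩
  · exact ⟨h2, hn⟩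

lemma gppBnds_dropLast (ws : List String) (pos : Int) :
    gppBnds ws.dropLast pos = (gppStarts ws pos).tail := by
  induction ws generalizing pos with
  | nil => simp [gppBnds, gppStarts]
  | cons w t ih =>
    cases t with
    | nil => simp [gppBnds, gppStarts]
    | cons u r =>
      simp only [List.dropLast_cons₂, gppBnds, gppStarts, List.tail_cons]
      rw [ih]
      simp [gppStarts]

lemma gpp_starts_mem_tail (ws : List String) (x : Int) (h2 : 2 ≤ x) :
    x ∈ gppStarts ws 0 ↔ x ∈ (gppStarts ws 0).tail := by
  cases ws with
  | nil => simp [gppStarts]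
  | cons w t =>
    simp only [gppStarts, List.mem_cons, List.tail_cons]
    constructor
    · rintro (rfl | h)
      · omega
      · exact h
    · exact Or.inr

lemma gpp_mem_condAdd (c : Prop) [Decidable c] (s : PySem.Set Int) (p x : Int) :
    x ∈ (if c then PySem.Set.add s p else s) ↔ x ∈ s ∨ (c ∧ x = p) := by
  split_ifs with h <;> simp [PySem.Set.mem_add, h]

lemma gpp_nodup_condAdd (c : Prop) [Decidable c] (s : PySem.Set Int) (p : Int) (h : s.Nodup) :
    (if c then PySem.Set.add s p else s).Nodup := by
  split_ifs <;> [exact PySem.Set.nodup_add _ _ h; exact h]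

lemma gpp_memA2 (n : Int) (ws : List String) (pos : Int) (s : PySem.Set Int) (x : Int) :
    x ∈ (ws.foldl (gppStepA2 n) (pos, s)).2 ↔ x ∈ s ∨ (x ∈ gppBnds ws pos ∧ 2 ≤ x ∧ x < n) := by
  induction ws generalizing pos s with
  | nil => simp [gppBnds]
  | cons w t ih =>
    simp only [List.foldl_cons, gppStepA2, gppBnds]
    rw [ih, gpp_mem_condAdd]
    simp only [List.mem_cons]
    constructor
    · rintro ((hs | ⟨hc, rfl⟩) | ⟨hb, h2⟩)
      · exact Or.inl hs
      · exact Or.inr ⟨Or.inl rfl, hc⟩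
      · exact Or.inr ⟨Or.inr hb, h2⟩
    · rintro (hs | ⟨(rfl | hb), h2⟩)
      · exact Or.inl (Or.inl hs)
      · exact Or.inl (Or.inr ⟨h2, rfl⟩)
      · exact Or.inr ⟨hb, h2⟩

lemma gpp_nodupA2 (n : Int) (ws : List String) (pos : Int) (s : PySem.Set Int) (h : s.Nodup) :
    (ws.foldl (gppStepA2 n) (pos, s)).2.Nodup := by
  induction ws generalizing pos s with
  | nil => exact h
  | cons w t ih => exact ih _ _ (gpp_nodup_condAdd _ _ _ h)

lemma gpp_memInner (n pos : Int) (s : PySem.Set Int) (x : Int) :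
    x ∈ (PySem.List.pyRange 1 4 1).foldl
        (fun s off => let p := pos + off; if 2 ≤ p ∧ p < n then PySem.Set.add s p else s) s ↔
      x ∈ s ∨ ∃ off : Int, 1 ≤ off ∧ off ≤ 3 ∧ x = pos + off ∧ 2 ≤ x ∧ x < n := by
  have hr : PySem.List.pyRange 1 4 1 = [1, 2, 3] := by decide
  rw [hr]
  simp only [List.foldl_cons, List.foldl_nil]
  rw [gpp_mem_condAdd, gpp_mem_condAdd, gpp_mem_condAdd]
  constructor
  · rintro (((hs | ⟨hc, rfl⟩) | ⟨hc, rfl⟩) | ⟨hc, rfl⟩)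
    · exact Or.inl hs
    · exact Or.inr ⟨1, by omega, by omega, rfl, hc⟩
    · exact Or.inr ⟨2, by omega, by omega, rfl, hc⟩
    · exact Or.inr ⟨3, by omega, by omega, rfl, hc⟩
  · rintro (hs | ⟨off, h1, h3, rfl, h2⟩)
    · exact Or.inl (Or.inl (Or.inl hs))
    · have hoff : off = 1 ∨ off = 2 ∨ off = 3 := by omega
      rcases hoff with rfl | rfl | rfl
      · exact Or.inl (Or.inl (Or.inr ⟨h2, rfl⟩))
      · exact Or.inl (Or.inr ⟨h2, rfl⟩)
      · exact Or.inr ⟨h2, rfl⟩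

lemma gpp_memA3 (n : Int) (ws : List String) (pos : Int) (s : PySem.Set Int) (x : Int) :
    x ∈ (ws.foldl (gppStepA3 n) (pos, s)).2 ↔
      x ∈ s ∨ ∃ st ∈ gppStarts ws pos, ∃ off : Int, 1 ≤ off ∧ off ≤ 3 ∧ x = st + off ∧ 2 ≤ x ∧ x < n := by
  induction ws generalizing pos s with
  | nil => simp [gppStarts]
  | cons w t ih =>
    simp only [List.foldl_cons, gppStepA3, gppStarts]
    rw [ih, gpp_memInner]
    simp only [List.mem_cons]
    constructor
    · rintro ((hs | ⟨off, ho⟩) | ⟨st, hst, hrest⟩)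
      · exact Or.inl hs
      · exact Or.inr ⟨pos, Or.inl rfl, off, ho⟩
      · exact Or.inr ⟨st, Or.inr hst, hrest⟩
    · rintro (hs | ⟨st, (rfl | hst), hrest⟩)
      · exact Or.inl (Or.inl hs)
      · exact Or.inl (Or.inr hrest)
      · exact Or.inr ⟨st, hst, hrest⟩

lemma gpp_nodupA3 (n : Int) (ws : List String) (pos : Int) (s : PySem.Set Int) (h : s.Nodup) :
    (ws.foldl (gppStepA3 n) (pos, s)).2.Nodup := by
  induction ws generalizing pos s with
  | nil => exact h
  | cons w t ih =>
    refine ih _ _ ?_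
    have hr : PySem.List.pyRange 1 4 1 = [1, 2, 3] := by decide
    simp only [hr, List.foldl_cons, List.foldl_nil]
    exact gpp_nodup_condAdd _ _ _ (gpp_nodup_condAdd _ _ _ (gpp_nodup_condAdd _ _ _ h))

-- B's starts-accumulating fold builds exactly gppStarts
lemma gpp_starts_fold (ws : List String) (acc : List Int) (pos : Int) :
    (ws.foldl (fun (st : List Int × Int) w =>
        (st.1 ++ [st.2], st.2 + (PySem.Str.len w : Int) + 1)) (acc, pos)).1
      = acc ++ gppStarts ws pos := by
  induction ws generalizing acc pos with
  | nil => simp [gppStarts]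
  | cons w t ih =>
    simp only [List.foldl_cons]
    rw [ih]
    simp [gppStarts]

-- B's per-position predicate agrees with A's membership predicate inside the bounds
lemma gpp_pred_iff (n : Int) (ws : List String) (x : Int) (h2 : 2 ≤ x) (hn : x < n) :
    ((decide (x < 6) || (gppStarts ws 0).any
        (fun s => decide (s ≤ x) && decide (x ≤ s + 3))) = true ↔ gppP n ws x) := by
  simp only [Bool.or_eq_true, List.any_eq_true, Bool.and_eq_true, decide_eq_true_eq, gppP]
  constructor
  · rintro (h6 | ⟨s, hs, hsx, hx3⟩)
    · exact Or.inl ⟨h2, by omega⟩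
    · by_cases hxs : x = s
      · subst hxs
        exact Or.inr (Or.inl ⟨(gpp_starts_mem_tail ws x h2).mp hs, h2, hn⟩)
      · exact Or.inr (Or.inr ⟨s, hs, x - s, by omega, by omega, by omega, h2, hn⟩)
  · rintro (⟨_, hm⟩ | ⟨hmem, _⟩ | ⟨s, hs, off, h1, h3, rfl, _⟩)
    · exact Or.inl (by omega)
    · exact Or.inr ⟨x, (gpp_starts_mem_tail ws x h2).mpr hmem, by omega, by omega⟩
    · exact Or.inr ⟨s, hs, by omega, by omega⟩

lemma gpp_main (n : Int) (ws : List String) :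
    PySem.List.sorted
      (((ws.foldl (gppStepA3 n)
          (0, ((PySem.List.slice ws none (some (-1))).foldl (gppStepA2 n)
            (0, (PySem.List.pyRange 2 (min 6 n) 1).foldl (fun s i => PySem.Set.add s i)
              PySem.Set.empty)).2)).2).filter
        (fun p => decide (2 ≤ p) && decide (p < n))) (fun x => x) false
    = (PySem.List.pyRange 2 n 1).filter
        (fun p => decide (p < 6) ||
          ((ws.foldl (fun (st : List Int × Int) w =>
              (st.1 ++ [st.2], st.2 + (PySem.Str.len w : Int) + 1)) ([], 0)).1).any
            (fun s => decide (s ≤ p) && decide (p ≤ s + 3))) := by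
  rw [PySem.List.slice_to_neg_one]
  set S0 : PySem.Set Int :=
    (PySem.List.pyRange 2 (min 6 n) 1).foldl (fun s i => PySem.Set.add s i) PySem.Set.empty with hS0
  set S1 := (ws.dropLast.foldl (gppStepA2 n) (0, S0)).2 with hS1
  set S := (ws.foldl (gppStepA3 n) (0, S1)).2 with hS
  have hS0eq : S0 = PySem.Set.ofList (PySem.List.pyRange 2 (min 6 n) 1) :=
    (PySem.Set.ofList_eq_foldl _).symm
  have hS0mem : ∀ x : Int, x ∈ S0 ↔ 2 ≤ x ∧ x < min 6 n := by
    intro x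
    rw [hS0eq, PySem.Set.mem_ofList, PySem.List.mem_pyRange_one]
  have hSmem : ∀ x : Int, x ∈ S ↔ gppP n ws x := by
    intro x
    rw [hS, gpp_memA3, hS1, gpp_memA2, hS0mem x, gppBnds_dropLast, gppP]
    rw [or_assoc]
  have hfilter : S.filter (fun p => decide (2 ≤ p) && decide (p < n)) = S := by
    apply List.filter_eq_self.mpr
    intro p hp
    have hb := gppP_bounds ((hSmem p).mp hp)
    simp [hb.1, hb.2]
  rw [hfilter, gpp_starts_fold ws [] 0, List.nil_append]
  have hpw : ((PySem.List.pyRange 2 n 1).filter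
      (fun p => decide (p < 6) || (gppStarts ws 0).any
        (fun s => decide (s ≤ p) && decide (p ≤ s + 3)))).Pairwise
      (fun a b : Int => a < b) :=
    (PySem.List.pairwise_lt_pyRange_one 2 n).filter _
  apply PySem.List.sorted_eq_of_perm_of_pairwise_lt
  · apply (List.perm_ext_iff_of_nodup (hpw.imp ne_of_lt) ?_).mpr
    · intro x
      rw [List.mem_filter, PySem.List.mem_pyRange_one, hSmem]
      constructor
      · rintro ⟨⟨h2, hn⟩, hget⟩
        exact (gpp_pred_iff n ws x h2 hn).mp hget
      · intro hp
        have hb := gppP_bounds hp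
        exact ⟨⟨hb.1, hb.2⟩, (gpp_pred_iff n ws x hb.1 hb.2).mpr hp⟩
    · exact gpp_nodupA3 _ _ _ _ (gpp_nodupA2 _ _ _ _ (hS0eq ▸ PySem.Set.nodup_ofList _))
  · exact hpw

-- ===== VERDICT (by name: the statement is the Claim_ definition above) =====
theorem get_prefix_positions_spec : Claim_equal_get_prefix_positions := by
  intro cmd _
  unfold Spec_get_prefix_positions get_prefix_positions get_prefix_positions_alt
  exact gpp_main _ _
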